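-- pv_equiv track=rewrite | github.com/DiniIrdina/Advanced_Algorithms_DataStructures | modified_BoyerMoore.py | matched_prefix
-- ===== SOURCE A (Python) =====
-- def zalgo(string):
--     zarray = [0] * len(string)
--     zarray[0] = len(string)
--
--     l, r = 0, 0
--
--     i = 1
--     while i < len(string):
--         remaining = r - i + 1
--         k = i - l
--
--         # Case 1: outside box
--         if i > r:
--             for j in range(i, len(string)):
--                 if string[j] == string[j-i]:
--                     zarray[i] += 1
--                 else:
--                     break
--             l, r = i, i + zarray[i] - 1
--         # Case 2: inside box
--         else:
--             # Case 2a
--             if zarray[k] < remaining: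
--                 zarray[i] = zarray[k]
--             # Case 2b
--             elif zarray[k] > remaining:
--                 zarray[i] = remaining
--             # Case 2c
--             elif zarray[k] == remaining:
--                 matches = 0
--                 for j in range(r+1, len(string)):
--                     if string[j] == string[j - i]:
--                         matches += 1
--                     else:
--                         break
--                 l, r = i, r + matches
--                 zarray[i] = r - i + 1
--         i += 1
--
--     return zarray
--
-- def matched_prefix(pattern):
--     """Function returns the number of shifts using matched prefix."""
--
--     z_array = zalgo(pattern)
--     mp_array = [0] * len(pattern)
--     p_length =  len(pattern)
--
--     for i in range(len(pattern)-1, 0, -1):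
--         if z_array[i] > 0 and z_array[i] + i == len(pattern):
--             mp_array[i] = z_array[i]
--
--         else:
--             if i != len(pattern) - 1:
--                 mp_array[i] = mp_array[i+1]
--
--     if mp_array[1] == 0:  # if no matched prefix, return 0
--         return 0
--
--     max_shifts = p_length - mp_array[1]
--     return max_shifts
-- ===== SOURCE B (Python) =====
-- def matched_prefix(pattern):
--     """Function returns the number of shifts using matched prefix."""
--     n = len(pattern)
--     for i in range(1, n):
--         if pattern[i:] == pattern[:n - i]:
--             return i
--     return 0
-- ===== Notes on version B (the rewrite author's own statement) =====
-- stated objective: simpler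
-- what changed: Replaces the Z-algorithm plus a backward matched-prefix propagation pass and a final arithmetic step by a single direct scan that returns the first shift i whose suffix pattern[i:] equals the prefix pattern[:n-i] (the longest border), which is exactly the value A computes.
import Mathlib
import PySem

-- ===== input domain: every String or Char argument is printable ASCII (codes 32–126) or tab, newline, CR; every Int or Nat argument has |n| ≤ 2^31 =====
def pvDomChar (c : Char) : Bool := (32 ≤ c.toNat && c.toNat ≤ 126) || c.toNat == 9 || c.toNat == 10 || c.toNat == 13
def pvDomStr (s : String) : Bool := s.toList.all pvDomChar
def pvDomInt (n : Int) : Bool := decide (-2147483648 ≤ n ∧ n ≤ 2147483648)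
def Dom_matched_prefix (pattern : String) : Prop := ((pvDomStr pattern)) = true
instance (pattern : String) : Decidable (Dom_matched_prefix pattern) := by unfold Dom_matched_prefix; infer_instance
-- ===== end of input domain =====

-- B replaces the Z-algorithm + backward propagation pass by a direct scan for the
-- smallest shift i whose suffix pattern[i:] equals the prefix pattern[:n-i] (simpler, not faster).

-- ===== PORT A =====
-- inner `for j in range(start, len): if s[j] == s[j-i]: z += 1 else: break` of zalgo;
-- returns the number of matches counted before the break.
def zrun (s : List Char) (i j : Nat) : Nat :=
  if _h : j < s.length then
    if s.getD j ' ' = s.getD (j - i) ' ' then zrun s i (j + 1) + 1 else 0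
  else 0
termination_by s.length - j

-- the `while i < len(string)` loop of zalgo, state (zarray, l, r, i).  All Python values
-- here are provably nonnegative on reachable states, so Nat is exact; `remaining`/`k`
-- may truncate on states where Python gets a negative value, but they are only read in
-- the branch (i <= r) where both agree.
def zloop (s : List Char) (z : List Nat) (l r i : Nat) : List Nat :=
  if _h : i < s.length then
    let remaining := r + 1 - i
    let k := i - l
    if r < i then  -- Case 1: outside box (Python `i > r`)
      let zi := zrun s i i
      zloop s (z.set i zi) i (i + zi - 1) (i + 1)
    else
      let zk := z.getD k 0
      if zk < remaining then zloop s (z.set i zk) l r (i + 1)       -- Case 2a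
      else if remaining < zk then zloop s (z.set i remaining) l r (i + 1)  -- Case 2b
      else                                                           -- Case 2c (zk = remaining)
        let cnt := zrun s i (r + 1)  -- `matches` is a Lean keyword
        let r' := r + cnt
        zloop s (z.set i (r' + 1 - i)) i r' (i + 1)
  else z
termination_by s.length - i

-- zalgo(string): on the empty string Python raises IndexError at `zarray[0] = len(string)`
-- (excluded by Pre_); `List.set` is a no-op there.
def zalgoL (s : List Char) : List Nat :=
  zloop s ((List.replicate s.length 0).set 0 s.length) 0 0 1

-- the backward `for i in range(len(pattern)-1, 0, -1)` loop of matched_prefix.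
def mploop (s : List Char) (z mp : List Nat) (i : Nat) : List Nat :=
  if i = 0 then mp
  else
    let mp' :=
      if 0 < z.getD i 0 ∧ z.getD i 0 + i = s.length then mp.set i (z.getD i 0)
      else if i ≠ s.length - 1 then mp.set i (mp.getD (i + 1) 0)
      else mp
    mploop s z mp' (i - 1)

-- matched_prefix(pattern); the final `mp_array[1]` raises IndexError for len(pattern) < 2
-- (excluded by Pre_), ported as getD which is exact on Pre_.
def matched_prefix (pattern : String) : Int :=
  let s := pattern.toList
  let z := zalgoL s
  let mp := mploop s z (List.replicate s.length 0) (s.length - 1)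
  if mp.getD 1 0 = 0 then 0 else (s.length : Int) - (mp.getD 1 0 : Int)

-- ===== PORT B =====
-- the `for i in range(1, n)` loop of Source B, returning the first i with
-- pattern[i:] == pattern[:n-i], else 0.
def altLoop (s : List Char) (i : Nat) : Nat :=
  if _h : i < s.length then
    if s.drop i = s.take (s.length - i) then i else altLoop s (i + 1)
  else 0
termination_by s.length - i

def matched_prefix_alt (pattern : String) : Int :=
  ((altLoop pattern.toList 1 : Nat) : Int)

-- ===== PRECONDITION & SPEC =====
-- A raises IndexError on patterns of length < 2 (zarray[0] on the empty string,
-- mp_array[1] on length 1); exactly those inputs are excluded.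
def Pre_matched_prefix (pattern : String) : Prop := 2 ≤ pattern.length
instance (pattern : String) : Decidable (Pre_matched_prefix pattern) := by unfold Pre_matched_prefix; infer_instance
def pvWitness_matched_prefix : String := "abcab"


def Spec_matched_prefix (pattern : String) (out : Int) : Prop := out = matched_prefix_alt pattern
instance (pattern : String) (out : Int) : Decidable (Spec_matched_prefix pattern out) := by unfold Spec_matched_prefix; infer_instance

-- ===== CLAIM (what is proved, stated in full; the proofs are below) =====
def Claim_equal_matched_prefix : Prop := ∀ (pattern : String), Dom_matched_prefix pattern → Pre_matched_prefix pattern → Spec_matched_prefix pattern (matched_prefix pattern)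

-- ===== LEMMAS AND PROOFS =====

-- length of the longest common prefix of two lists
def lcp : List Char → List Char → Nat
  | a :: x, b :: y => if a = b then lcp x y + 1 else 0
  | _, _ => 0

theorem lcp_le_left : ∀ (x y : List Char), lcp x y ≤ x.length := by
  intro x
  induction x with
  | nil => intro y; cases y <;> simp [lcp]
  | cons a x ih =>
    intro y; cases y with
    | nil => simp [lcp]
    | cons b y =>
      simp only [lcp]; split
      · have := ih y; simp; omega
      · simp

theorem lcp_le_right : ∀ (x y : List Char), lcp x y ≤ y.length := by
  intro x
  induction x with
  | nil => intro y; cases y <;> simp [lcp]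
  | cons a x ih =>
    intro y; cases y with
    | nil => simp [lcp]
    | cons b y =>
      simp only [lcp]; split
      · have := ih y; simp; omega
      · simp

theorem lcp_getD_eq : ∀ (x y : List Char) (t : Nat), t < lcp x y → x.getD t ' ' = y.getD t ' ' := by
  intro x
  induction x with
  | nil => intro y t h; cases y <;> simp [lcp] at h
  | cons a x ih =>
    intro y t h
    cases y with
    | nil => simp [lcp] at h
    | cons b y =>
      simp only [lcp] at h
      split at h
      · cases t with
        | zero => simpa
        | succ t => simpa using ih y t (by omega)
      · omega

theorem lcp_mismatch : ∀ (x y : List Char), lcp x y < x.length → lcp x y < y.length →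
    x.getD (lcp x y) ' ' ≠ y.getD (lcp x y) ' ' := by
  intro x
  induction x with
  | nil => intro y h; simp at h
  | cons a x ih =>
    intro y hx hy
    cases y with
    | nil => simp at hy
    | cons b y =>
      simp only [lcp] at hx hy ⊢
      by_cases hab : a = b
      · simp only [if_pos hab] at hx hy ⊢
        simpa [List.getD] using ih y (by simpa using hx) (by simpa using hy)
      · simp only [if_neg hab]
        simpa [List.getD] using hab

theorem lcp_unique : ∀ (x y : List Char) (m : Nat), m ≤ x.length → m ≤ y.length →
    (∀ t, t < m → x.getD t ' ' = y.getD t ' ') →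
    (m = x.length ∨ m = y.length ∨ x.getD m ' ' ≠ y.getD m ' ') → lcp x y = m := by
  intro x y m hx hy hagree hstop
  have hl := lcp_le_left x y
  have hr := lcp_le_right x y
  have h1 : lcp x y ≤ m := by
    by_contra h
    push_neg at h
    exact absurd (lcp_getD_eq x y m h) (by
      rcases hstop with h' | h' | h'
      · omega
      · omega
      · exact h')
  have h2 : m ≤ lcp x y := by
    by_contra h
    push_neg at h
    exact lcp_mismatch x y (by omega) (by omega) (hagree _ h)
  omega

theorem lcp_add : ∀ (d : Nat) (x y : List Char), d ≤ x.length → d ≤ y.length →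
    (∀ t, t < d → x.getD t ' ' = y.getD t ' ') →
    lcp x y = d + lcp (x.drop d) (y.drop d) := by
  intro d
  induction d with
  | zero => intro x y _ _ _; simp
  | succ d ih =>
    intro x y hx hy hagree
    cases x with
    | nil => simp at hx
    | cons a x =>
      cases y with
      | nil => simp at hy
      | cons b y =>
        have hab : a = b := by simpa using hagree 0 (by omega)
        simp only [lcp, if_pos hab, List.drop_succ_cons]
        have := ih x y (by simpa using hx) (by simpa using hy)
          (fun t ht => by simpa using hagree (t + 1) (by omega))
        omega

theorem getD_drop (s : List Char) (a t : Nat) : (s.drop a).getD t ' ' = s.getD (a + t) ' ' := by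
  simp [List.getD, List.getElem?_drop]

theorem lcp_nil_right (x : List Char) : lcp x [] = 0 := by cases x <;> rfl

theorem drop_cons_getD (s : List Char) (m : Nat) (h : m < s.length) :
    s.drop m = s.getD m ' ' :: s.drop (m + 1) := by
  rw [List.getD_eq_getElem _ _ h]
  exact List.drop_eq_getElem_cons h

theorem zrun_eq_lcp (s : List Char) : ∀ j i, i ≤ j → zrun s i j = lcp (s.drop (j - i)) (s.drop j) := by
  have main : ∀ f j i, s.length ≤ j + f → i ≤ j →
      zrun s i j = lcp (s.drop (j - i)) (s.drop j) := by
    intro f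
    induction f with
    | zero =>
      intro j i hf _
      rw [zrun, dif_neg (by omega)]
      rw [List.drop_eq_nil_of_le (by omega : s.length ≤ j), lcp_nil_right]
    | succ f ih =>
      intro j i hf hij
      rw [zrun]
      by_cases hj : j < s.length
      · rw [dif_pos hj]
        rw [drop_cons_getD s (j - i) (by omega), drop_cons_getD s j hj]
        simp only [lcp]
        by_cases hc : s.getD j ' ' = s.getD (j - i) ' '
        · rw [if_pos hc, if_pos hc.symm]
          have := ih (j + 1) i (by omega) (by omega)
          rw [show j + 1 - i = j - i + 1 by omega] at this
          omega
        · rw [if_neg hc, if_neg (fun h => hc h.symm)]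
      · rw [dif_neg hj]
        rw [List.drop_eq_nil_of_le (by omega : s.length ≤ j), lcp_nil_right]
  intro j i hij
  exact main s.length j i (by omega) hij

-- the intended value of zarray[j]
def zv (s : List Char) (j : Nat) : Nat := if j = 0 then s.length else lcp s (s.drop j)

def ZInv (s : List Char) (z : List Nat) (l r i : Nat) : Prop :=
  z.length = s.length ∧
  (∀ j, j < i → z.getD j 0 = zv s j) ∧
  (r < i ∨ (1 ≤ l ∧ l < i ∧ r + 1 = l + lcp s (s.drop l) ∧ r < s.length))

theorem getD_set_self (z : List Nat) (i a : Nat) (h : i < z.length) : (z.set i a).getD i 0 = a := by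
  simp [List.getD, h]

theorem getD_set_ne (z : List Nat) (i j a : Nat) (h : i ≠ j) : (z.set i a).getD j 0 = z.getD j 0 := by
  simp [List.getD, List.getElem?_set_ne h]

-- agreement over s extracted from a known lcp value, in index form
theorem lcp_drop_agree (s : List Char) (a t : Nat) (h : t < lcp s (s.drop a)) :
    s.getD t ' ' = s.getD (a + t) ' ' := by
  have := lcp_getD_eq s (s.drop a) t h
  rwa [getD_drop] at this

theorem lcp_drop_le (s : List Char) (a : Nat) : lcp s (s.drop a) ≤ s.length - a := by
  have := lcp_le_right s (s.drop a)
  simpa using this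

theorem zloop_correct (s : List Char) : ∀ i z l r, 1 ≤ i → ZInv s z l r i →
    ∀ j, j < s.length → (zloop s z l r i).getD j 0 = zv s j := by
  have main : ∀ f i z l r, s.length ≤ i + f → 1 ≤ i → ZInv s z l r i →
      ∀ j, j < s.length → (zloop s z l r i).getD j 0 = zv s j := by
    intro f
    induction f with
    | zero =>
      intro i z l r hf hi hinv j hj
      rw [zloop, dif_neg (by omega)]
      exact hinv.2.1 j (by omega)
    | succ f ih =>
      intro i z l r hf hi hinv j hj
      obtain ⟨hlen, hzj, hbox⟩ := hinv
      rw [zloop]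
      by_cases hin : i < s.length
      · rw [dif_pos hin]
        dsimp only
        by_cases hri : r < i
        · -- Case 1: outside box
          rw [if_pos hri]
          have hzi : zrun s i i = lcp s (s.drop i) := by
            have := zrun_eq_lcp s i i (le_refl i)
            simpa using this
          have hle : lcp s (s.drop i) ≤ s.length - i := lcp_drop_le s i
          refine ih (i + 1) (z.set i (zrun s i i)) i (i + zrun s i i - 1) (by omega) (by omega)
            ⟨by simpa using hlen, ?_, ?_⟩ j hj
          · intro j' hj'
            by_cases hj'i : j' = i
            · subst hj'i
              rw [getD_set_self _ _ _ (by omega), hzi, zv, if_neg (by omega)]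
            · rw [getD_set_ne _ _ _ _ (fun h => hj'i h.symm)]
              exact hzj j' (by omega)
          · by_cases h0 : zrun s i i = 0
            · left; omega
            · right; exact ⟨by omega, by omega, by omega, by omega⟩
        · -- Case 2: inside box
          rw [if_neg hri]
          obtain ⟨hl1, hli, hrl, hrn⟩ := hbox.resolve_left hri
          have hzk : z.getD (i - l) 0 = lcp s (s.drop (i - l)) := by
            have := hzj (i - l) (by omega)
            rwa [zv, if_neg (by omega)] at this
          have hzkle : lcp s (s.drop (i - l)) ≤ s.length - (i - l) := lcp_drop_le s (i - l)
          -- agreement through the box: k + t < zl transfers index k+t to i+t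
          have hbtrans : ∀ t, (i - l) + t < lcp s (s.drop l) →
              s.getD ((i - l) + t) ' ' = s.getD (i + t) ' ' := by
            intro t ht
            have := lcp_drop_agree s l ((i - l) + t) ht
            rw [show l + ((i - l) + t) = i + t by omega] at this
            exact this
          -- agreement of prefix with the k-shifted suffix
          have hkagree : ∀ t, t < lcp s (s.drop (i - l)) → (i - l) + t < lcp s (s.drop l) →
              s.getD t ' ' = s.getD (i + t) ' ' := fun t ht htr =>
            (lcp_drop_agree s (i - l) t ht).trans (hbtrans t htr)
          have hzlval : lcp s (s.drop l) = (i - l) + (r + 1 - i) := by omega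
          by_cases hlt : z.getD (i - l) 0 < r + 1 - i
          · -- Case 2a
            rw [if_pos hlt]
            rw [hzk] at hlt
            have hval : lcp s (s.drop i) = lcp s (s.drop (i - l)) := by
              apply lcp_unique
              · exact lcp_le_left s _
              · simp only [List.length_drop]; omega
              · intro t ht
                rw [getD_drop]
                exact hkagree t ht (by omega)
              · right; right
                rw [getD_drop]
                have hm := lcp_mismatch s (s.drop (i - l)) (by omega)
                  (by simp only [List.length_drop]; omega)
                rw [getD_drop] at hm
                have htr := hbtrans (lcp s (s.drop (i - l))) (by omega)
                rw [← htr]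
                exact hm
            refine ih (i + 1) _ l r (by omega) (by omega)
              ⟨by simpa using hlen, ?_, Or.inr ⟨hl1, by omega, hrl, hrn⟩⟩ j hj
            intro j' hj'
            by_cases hji : j' = i
            · subst hji
              rw [getD_set_self _ _ _ (by omega), hzk, zv, if_neg (by omega)]
              exact hval.symm
            · rw [getD_set_ne _ _ _ _ (fun h => hji h.symm)]
              exact hzj j' (by omega)
          · rw [if_neg hlt]
            by_cases hgt : r + 1 - i < z.getD (i - l) 0
            · -- Case 2b
              rw [if_pos hgt]
              rw [hzk] at hlt hgt
              have hval : lcp s (s.drop i) = r + 1 - i := by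
                apply lcp_unique
                · omega
                · simp only [List.length_drop]; omega
                · intro t ht
                  rw [getD_drop]
                  exact hkagree t (by omega) (by omega)
                · by_cases hr1 : r + 1 = s.length
                  · right; left; simp only [List.length_drop]; omega
                  · right; right
                    rw [getD_drop]
                    have h1 := lcp_drop_agree s (i - l) (r + 1 - i) (by omega)
                    rw [show (i - l) + (r + 1 - i) = lcp s (s.drop l) by omega] at h1
                    have h2 := lcp_mismatch s (s.drop l) (by omega)
                      (by simp only [List.length_drop]; omega)
                    rw [getD_drop] at h2
                    rw [show l + lcp s (s.drop l) = r + 1 by omega] at h2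
                    rw [h1, show i + (r + 1 - i) = r + 1 by omega]
                    exact h2
              refine ih (i + 1) _ l r (by omega) (by omega)
                ⟨by simpa using hlen, ?_, Or.inr ⟨hl1, by omega, hrl, hrn⟩⟩ j hj
              intro j' hj'
              by_cases hji : j' = i
              · subst hji
                rw [getD_set_self _ _ _ (by omega), zv, if_neg (by omega)]
                exact hval.symm
              · rw [getD_set_ne _ _ _ _ (fun h => hji h.symm)]
                exact hzj j' (by omega)
            · -- Case 2c
              rw [if_neg hgt]
              rw [hzk] at hlt hgt
              have hcnt := zrun_eq_lcp s (r + 1) i (by omega)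
              have hagree2 : ∀ t, t < r + 1 - i → s.getD t ' ' = (s.drop i).getD t ' ' := by
                intro t ht
                rw [getD_drop]
                exact hkagree t (by omega) (by omega)
              have hval : lcp s (s.drop i) = (r + 1 - i) + zrun s i (r + 1) := by
                rw [lcp_add (r + 1 - i) s (s.drop i) (by omega)
                  (by simp only [List.length_drop]; omega) hagree2, List.drop_drop,
                  show i + (r + 1 - i) = r + 1 by omega, ← hcnt]
              have hle := lcp_drop_le s i
              refine ih (i + 1) _ i (r + zrun s i (r + 1)) (by omega) (by omega)
                ⟨by simpa using hlen, ?_, Or.inr ⟨by omega, by omega, by omega, by omega⟩⟩ j hj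
              intro j' hj'
              by_cases hji : j' = i
              · subst hji
                rw [getD_set_self _ _ _ (by omega), zv, if_neg (by omega)]
                omega
              · rw [getD_set_ne _ _ _ _ (fun h => hji h.symm)]
                exact hzj j' (by omega)
      · rw [dif_neg hin]
        exact hzj j (by omega)
  intro i z l r hi hinv j hj
  exact main s.length i z l r (by omega) hi hinv j hj

theorem zalgoL_correct (s : List Char) (h : 1 ≤ s.length) :
    ∀ j, j < s.length → (zalgoL s).getD j 0 = zv s j := by
  intro j hj
  apply zloop_correct s 1 _ 0 0 (le_refl 1) ?_ j hj
  refine ⟨by simp, ?_, Or.inl (by omega)⟩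
  intro j' hj'
  have hj0 : j' = 0 := by omega
  subst hj0
  rw [getD_set_self _ _ _ (by simpa using h), zv, if_pos rfl]

-- the intended value of mp_array[i]
def mpv (s : List Char) (i : Nat) : Nat :=
  if _h : i < s.length then
    if 0 < lcp s (s.drop i) ∧ lcp s (s.drop i) + i = s.length then s.length - i
    else if i = s.length - 1 then 0 else mpv s (i + 1)
  else 0
termination_by s.length - i

theorem mploop_correct (s : List Char) (z : List Nat)
    (hz : ∀ j, 1 ≤ j → j < s.length → z.getD j 0 = lcp s (s.drop j)) :
    ∀ i mp, i < s.length → mp.length = s.length →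
      (∀ j, i < j → j < s.length → mp.getD j 0 = mpv s j) →
      (∀ j, j ≤ i → mp.getD j 0 = 0) →
      ∀ j, 1 ≤ j → j < s.length → (mploop s z mp i).getD j 0 = mpv s j := by
  intro i
  induction i with
  | zero =>
    intro mp _ _ hup _ j hj1 hj2
    rw [mploop, if_pos rfl]
    exact hup j (by omega) hj2
  | succ i ih =>
    intro mp hin hlen hup hzero j hj1 hj2
    rw [mploop, if_neg (by omega)]
    dsimp only
    simp only [Nat.add_sub_cancel]
    have hzv : z.getD (i + 1) 0 = lcp s (s.drop (i + 1)) := hz (i + 1) (by omega) hin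
    by_cases hc : 0 < z.getD (i + 1) 0 ∧ z.getD (i + 1) 0 + (i + 1) = s.length
    · rw [if_pos hc]
      refine ih _ (by omega) (by simpa using hlen) ?_ ?_ j hj1 hj2
      · intro j' hj'1 hj'2
        by_cases hji : j' = i + 1
        · subst hji
          rw [getD_set_self _ _ _ (by omega), hzv]
          rw [mpv, dif_pos hin, if_pos ⟨by omega, by omega⟩]
          omega
        · rw [getD_set_ne _ _ _ _ (fun h => hji h.symm)]
          exact hup j' (by omega) hj'2
      · intro j' hj'
        rw [getD_set_ne _ _ _ _ (by omega)]
        exact hzero j' (by omega)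
    · rw [if_neg hc]
      have hcl : ¬(0 < lcp s (s.drop (i + 1)) ∧ lcp s (s.drop (i + 1)) + (i + 1) = s.length) := by
        rw [← hzv]; exact hc
      by_cases hlast : i + 1 = s.length - 1
      · rw [if_neg (by omega : ¬ i + 1 ≠ s.length - 1)]
        refine ih _ (by omega) hlen ?_ (fun j' hj' => hzero j' (by omega)) j hj1 hj2
        intro j' hj'1 hj'2
        by_cases hji : j' = i + 1
        · subst hji
          rw [mpv, dif_pos hin, if_neg hcl, if_pos hlast]
          exact hzero _ (le_refl _)
        · exact hup j' (by omega) hj'2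
      · rw [if_pos (by omega : i + 1 ≠ s.length - 1)]
        refine ih _ (by omega) (by simpa using hlen) ?_ ?_ j hj1 hj2
        · intro j' hj'1 hj'2
          by_cases hji : j' = i + 1
          · subst hji
            rw [getD_set_self _ _ _ (by omega)]
            rw [mpv, dif_pos hin, if_neg hcl, if_neg hlast]
            exact hup (i + 2) (by omega) (by omega)
          · rw [getD_set_ne _ _ _ _ (fun h => hji h.symm)]
            exact hup j' (by omega) hj'2
        · intro j' hj'
          rw [getD_set_ne _ _ _ _ (by omega)]
          exact hzero j' (by omega)

theorem getD_take (s : List Char) (m t : Nat) (h : t < m) :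
    (s.take m).getD t ' ' = s.getD t ' ' := by
  simp [List.getD, List.getElem?_take, h]

theorem border_iff (s : List Char) (i : Nat) (h : i ≤ s.length) :
    (s.drop i = s.take (s.length - i)) ↔ lcp s (s.drop i) = s.length - i := by
  constructor
  · intro hb
    apply lcp_unique
    · omega
    · simp only [List.length_drop]
      omega
    · intro t ht
      rw [hb, getD_take _ _ _ ht]
    · right; left
      simp only [List.length_drop]
  · intro hl
    apply List.ext_getElem (by simp only [List.length_drop, List.length_take]; omega)
    intro t h1 h2
    have h1' : t < s.length - i := by simpa using h1
    have hag := lcp_getD_eq s (s.drop i) t (by rw [hl]; exact h1')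
    have h3 : (s.drop i)[t] = (s.drop i).getD t ' ' := (List.getD_eq_getElem _ _ h1).symm
    have h4 : (s.take (s.length - i))[t] = s.getD t ' ' := by
      rw [List.getElem_take]
      exact (List.getD_eq_getElem _ _ (by omega)).symm
    rw [h3, h4, ← hag]

theorem alt_mpv (s : List Char) : ∀ i, 1 ≤ i →
    (altLoop s i = 0 ∧ mpv s i = 0) ∨
    (0 < altLoop s i ∧ altLoop s i < s.length ∧ mpv s i = s.length - altLoop s i) := by
  have main : ∀ f i, s.length ≤ i + f → 1 ≤ i →
      (altLoop s i = 0 ∧ mpv s i = 0) ∨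
      (0 < altLoop s i ∧ altLoop s i < s.length ∧ mpv s i = s.length - altLoop s i) := by
    intro f
    induction f with
    | zero =>
      intro i hf hi
      left
      rw [altLoop, dif_neg (by omega), mpv, dif_neg (by omega)]
      exact ⟨rfl, rfl⟩
    | succ f ih =>
      intro i hf hi
      by_cases hin : i < s.length
      · rw [altLoop, dif_pos hin]
        by_cases hb : s.drop i = s.take (s.length - i)
        · rw [if_pos hb]
          have hl := (border_iff s i (by omega)).mp hb
          right
          refine ⟨by omega, hin, ?_⟩
          rw [mpv, dif_pos hin, if_pos ⟨by omega, by omega⟩]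
        · rw [if_neg hb]
          have hlne : ¬(0 < lcp s (s.drop i) ∧ lcp s (s.drop i) + i = s.length) := by
            intro hc
            exact hb ((border_iff s i (by omega)).mpr (by omega))
          by_cases hlast : i = s.length - 1
          · left
            refine ⟨?_, ?_⟩
            · rw [altLoop, dif_neg (by omega)]
            · rw [mpv, dif_pos hin, if_neg hlne, if_pos hlast]
          · rw [mpv, dif_pos hin, if_neg hlne, if_neg hlast]
            exact ih (i + 1) (by omega) (by omega)
      · left
        rw [altLoop, dif_neg hin, mpv, dif_neg hin]
        exact ⟨rfl, rfl⟩
  intro i hi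
  exact main s.length i (by omega) hi

-- ===== VERDICT (by name: the statement is the Claim_ definition above) =====
theorem getD_replicate_zero (n j : Nat) : (List.replicate n (0 : Nat)).getD j 0 = 0 := by
  simp [List.getD, List.getElem?_replicate]
  split <;> simp

theorem matched_prefix_spec : Claim_equal_matched_prefix := by
  unfold Claim_equal_matched_prefix
  intro p _ hpre
  unfold Pre_matched_prefix at hpre
  unfold Spec_matched_prefix matched_prefix matched_prefix_alt
  dsimp only
  have hlen : 2 ≤ p.toList.length := by
    rwa [String.length_toList]
  have hz : ∀ j, 1 ≤ j → j < p.toList.length →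
      (zalgoL p.toList).getD j 0 = lcp p.toList (p.toList.drop j) := by
    intro j h1 h2
    rw [zalgoL_correct p.toList (by omega) j h2, zv, if_neg (by omega)]
  have hmp := mploop_correct p.toList (zalgoL p.toList) hz (p.toList.length - 1)
    (List.replicate p.toList.length 0) (by omega) (by simp)
    (fun j h1 h2 => absurd h2 (by omega))
    (fun j _ => getD_replicate_zero _ _)
    1 (le_refl 1) (by omega)
  rw [hmp]
  rcases alt_mpv p.toList 1 (le_refl 1) with ⟨h0, hm0⟩ | ⟨hpos, hlt, hmv⟩
  · rw [hm0, if_pos rfl, h0]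
    simp
  · rw [hmv, if_neg (by omega)]
    push_cast [Nat.cast_sub (le_of_lt hlt)]
    omega
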